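-- pv_equiv track=rewrite | github.com/devds96/pytest-samples | src/pytest_samples/tools/_iterabletools.py | count_truefalse
-- ===== SOURCE A (Python) =====
-- from typing import Iterable as _Iterable, Tuple as _Tuple
--
-- def count_truefalse(it: _Iterable[bool]) -> _Tuple[int, int]:
--     """Separately count the occurences of `True` and `False` in
--     and iterable of `bool`s.
--
--     Args:
--         it (Iterable[bool]): The iterable to process.
--
--     Returns:
--         Tuple[int, int]: The amount of `True` occurrences,
--             followed by the amount of `False` occurrences.
--     """
--     true = 0
--     false = 0
--     for b in it:
--         if b:
--             true += 1
--         else: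
--             false += 1
--     return true, false
-- ===== SOURCE B (Python) =====
-- def count_truefalse(it):
--     data = [bool(b) for b in it]
--     return data.count(True), data.count(False)
-- ===== Notes on version B (the rewrite author's own statement) =====
-- stated objective: idiomatic
-- what changed: Replaces the two-accumulator branch-increment loop with materializing the booleans once and taking two library count passes (list.count(True), list.count(False)), with no hand-written loop or accumulator at all.
import Mathlib
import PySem

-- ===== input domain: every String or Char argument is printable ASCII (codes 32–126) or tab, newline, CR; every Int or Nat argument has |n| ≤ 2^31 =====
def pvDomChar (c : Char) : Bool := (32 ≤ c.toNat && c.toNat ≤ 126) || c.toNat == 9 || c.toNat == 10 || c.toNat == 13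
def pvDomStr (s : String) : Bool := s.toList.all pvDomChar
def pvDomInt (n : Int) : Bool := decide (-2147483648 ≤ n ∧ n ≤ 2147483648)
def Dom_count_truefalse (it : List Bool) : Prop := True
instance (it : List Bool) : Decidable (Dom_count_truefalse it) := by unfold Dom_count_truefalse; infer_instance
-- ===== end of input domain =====

-- B replaces A's two-accumulator branch-increment loop with two library count passes over the materialized list (idiomatic).

-- ===== PORT A =====
-- true = 0; false = 0; for b in it: if b: true += 1 else: false += 1
def count_truefalse (it : List Bool) : Int × Int :=
  it.foldl (fun (tf : Int × Int) b => if b then (tf.1 + 1, tf.2) else (tf.1, tf.2 + 1)) (0, 0)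

-- ===== PORT B =====
-- data = [bool(b) for b in it]; return data.count(True), data.count(False)
def count_truefalse_alt (it : List Bool) : Int × Int :=
  let data := it.map (fun b => b)
  ((PySem.List.count data true : Int), (PySem.List.count data false : Int))

-- ===== PRECONDITION & SPEC =====
def Spec_count_truefalse (it : List Bool) (out : Int × Int) : Prop := out = count_truefalse_alt it
instance (it : List Bool) (out : Int × Int) : Decidable (Spec_count_truefalse it out) := by unfold Spec_count_truefalse; infer_instance

-- ===== CLAIM (what is proved, stated in full; the proofs are below) =====
def Claim_equal_count_truefalse : Prop := ∀ (it : List Bool), Dom_count_truefalse it → Spec_count_truefalse it (count_truefalse it)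

-- ===== LEMMAS AND PROOFS =====
theorem count_truefalse_foldl_shift (it : List Bool) (t f : Int) :
    it.foldl (fun (tf : Int × Int) b => if b then (tf.1 + 1, tf.2) else (tf.1, tf.2 + 1)) (t, f)
      = (t + (it.count true : Int), f + (it.count false : Int)) := by
  induction it generalizing t f with
  | nil => simp
  | cons b rest ih =>
    cases b <;> simp [List.foldl_cons, ih, Prod.ext_iff] <;> omega

-- ===== VERDICT (by name: the statement is the Claim_ definition above) =====
theorem count_truefalse_spec : Claim_equal_count_truefalse := by
  intro it _
  unfold Spec_count_truefalse count_truefalse count_truefalse_alt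
  rw [count_truefalse_foldl_shift]
  simp [PySem.List.count_eq]
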